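-- pv_equiv track=rewrite | github.com/DHDaniel/mc-tictactoe | TTTBoard.py | are_all_the_same
-- ===== SOURCE A (Python) =====
-- def are_all_the_same(values):
--     """
--     Takes in a list and returns whether all values are the same, and not 0 (empty)
--     """
--     if 0 in values:
--         return False
--
--     first_value = values[0]
--     for value in values:
--         if value != first_value:
--             return False
--
--     return True
-- ===== SOURCE B (Python) =====
-- def are_all_the_same(values):
--     """
--     Takes in a list and returns whether all values are the same, and not 0 (empty)
--     """
--     lo = min(values)
--     hi = max(values)
--     return lo == hi and lo != 0
-- ===== Notes on version B (the rewrite author's own statement) =====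
-- stated objective: alternative
-- what changed: Instead of a 0-membership pass plus a scan comparing each element to the first, B computes the minimum and maximum of the list and returns min==max and min!=0 (a uniform list is exactly one whose extrema coincide, and then its single value is nonzero iff min is).
import Mathlib
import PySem

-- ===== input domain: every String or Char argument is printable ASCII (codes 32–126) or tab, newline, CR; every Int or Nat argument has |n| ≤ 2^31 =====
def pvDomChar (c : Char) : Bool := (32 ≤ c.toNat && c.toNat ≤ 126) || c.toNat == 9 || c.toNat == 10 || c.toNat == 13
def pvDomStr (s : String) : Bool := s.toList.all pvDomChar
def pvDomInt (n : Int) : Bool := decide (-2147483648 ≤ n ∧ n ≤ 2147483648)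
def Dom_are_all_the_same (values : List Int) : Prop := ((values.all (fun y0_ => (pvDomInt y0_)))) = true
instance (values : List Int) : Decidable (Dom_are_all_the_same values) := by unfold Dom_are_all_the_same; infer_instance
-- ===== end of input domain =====

-- B replaces A's 0-membership pass plus scan-against-first loop by computing the list's
-- extrema: all values equal and nonzero iff min == max and min != 0. Return value only.

-- ===== PORT A =====
-- the 'for value in values' loop, comparing each element to first_value
def aScanLoop (first : Int) : List Int → Bool
  | [] => true
  | v :: rest => if v ≠ first then false else aScanLoop first rest

def are_all_the_same (values : List Int) : Bool :=
  if values.contains 0 then false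
  else
    match PySem.List.pyGet? values 0 with
    | none => false          -- IndexError on empty list; excluded by Pre_
    | some first => aScanLoop first values

-- ===== PORT B =====
def are_all_the_same_alt (values : List Int) : Bool :=
  match PySem.List.min? values (fun x => x), PySem.List.max? values (fun x => x) with
  | some lo, some hi => lo == hi && lo != 0
  | _, _ => false            -- ValueError on empty list; excluded by Pre_

-- ===== PRECONDITION & SPEC =====
-- Pre_ excludes only the empty list, on which A raises IndexError and B raises ValueError.
def Pre_are_all_the_same (values : List Int) : Prop := values ≠ []
instance (values : List Int) : Decidable (Pre_are_all_the_same values) := by unfold Pre_are_all_the_same; infer_instance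
def pvWitness_are_all_the_same : List Int := [2, 2]

def Spec_are_all_the_same (values : List Int) (out : Bool) : Prop := out = are_all_the_same_alt values
instance (values : List Int) (out : Bool) : Decidable (Spec_are_all_the_same values out) := by unfold Spec_are_all_the_same; infer_instance

-- ===== CLAIM (what is proved, stated in full; the proofs are below) =====
def Claim_equal_are_all_the_same : Prop := ∀ (values : List Int), Dom_are_all_the_same values → Pre_are_all_the_same values → Spec_are_all_the_same values (are_all_the_same values)

-- ===== LEMMAS AND PROOFS =====

theorem aScanLoop_iff (first : Int) (t : List Int) :
    aScanLoop first t = true ↔ ∀ x ∈ t, x = first := by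
  induction t with
  | nil => simp [aScanLoop]
  | cons a t ih =>
    by_cases hx : a = first
    · subst hx; simpa [aScanLoop] using ih
    · simp [aScanLoop, hx]

-- ===== VERDICT (by name: the statement is the Claim_ definition above) =====
theorem are_all_the_same_spec : Claim_equal_are_all_the_same := by
  intro values _ hpre
  unfold Spec_are_all_the_same
  obtain ⟨h, t, rfl⟩ : ∃ h t, values = h :: t := by
    cases values with
    | nil => exact absurd rfl hpre
    | cons h t => exact ⟨h, t, rfl⟩
  obtain ⟨m, hm⟩ : ∃ m, PySem.List.min? (h :: t) (fun x => x) = some m := by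
    cases hmin : PySem.List.min? (h :: t) (fun x => x) with
    | none => exact absurd ((PySem.List.min?_eq_none_iff _ _).mp hmin) (by simp)
    | some m => exact ⟨m, rfl⟩
  obtain ⟨M, hM⟩ : ∃ M, PySem.List.max? (h :: t) (fun x => x) = some M := by
    cases hmax : PySem.List.max? (h :: t) (fun x => x) with
    | none => exact absurd ((PySem.List.max?_eq_none_iff _ _).mp hmax) (by simp)
    | some M => exact ⟨M, rfl⟩
  have hmMem : m ∈ h :: t := PySem.List.min?_mem hm
  have hMMem : M ∈ h :: t := PySem.List.max?_mem hM
  have hmMin : ∀ y ∈ h :: t, m ≤ y := PySem.List.min?_isMin hm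
  have hMMax : ∀ y ∈ h :: t, y ≤ M := PySem.List.max?_isMax hM
  have hget : PySem.List.pyGet? (h :: t) 0 = some h := by
    simp [PySem.List.pyGet?, PySem.List.pyIdx?]
  unfold are_all_the_same are_all_the_same_alt
  rw [hget, hm, hM]
  rw [Bool.eq_iff_iff]
  simp only [Bool.and_eq_true, beq_iff_eq, bne_iff_ne, ne_eq]
  constructor
  · -- A true → B true
    intro hA
    split_ifs at hA with h0
    have hall : ∀ x ∈ h :: t, x = h := (aScanLoop_iff h (h :: t)).1 hA
    have hmh : m = h := hall m hmMem
    have hMh : M = h := hall M hMMem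
    have hh0 : h ≠ 0 := by
      intro hc
      exact h0 (List.contains_iff_mem.mpr (by simp [← hc]))
    exact ⟨hmh.trans hMh.symm, hmh ▸ hh0⟩
  · -- B true → A true
    rintro ⟨hmM, hm0⟩
    have hall : ∀ x ∈ h :: t, x = m := fun x hx =>
      le_antisymm (hmM ▸ hMMax x hx) (hmMin x hx)
    have h0 : ¬ (h :: t).contains 0 := by
      intro hc
      exact hm0 ((hall 0 (List.contains_iff_mem.mp hc)).symm)
    rw [if_neg h0]
    exact (aScanLoop_iff h (h :: t)).2 fun x hx => (hall x hx).trans (hall h (by simp)).symm
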